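-- pv_equiv track=rewrite | github.com/Tanyamalviya01/Blockchain-Governance-Data-Analysis | commits/get_eip_data.py | parse_eip_content
-- ===== SOURCE A (Python) =====
-- def parse_eip_content(content, eip_number):
--     """Parse EIP markdown content to extract metadata"""
--     try:
--         lines = content.split('\n')
--         metadata = {'eip_number': eip_number}
--
--         in_frontmatter = False
--         content_lines = []
--
--         for line in lines:
--             line_stripped = line.strip()
--
--             if line_stripped == '---':
--                 in_frontmatter = not in_frontmatter
--                 continue
--
--             if in_frontmatter and ':' in line:
--                 try:
--                     key, value = line.split(':', 1)
--                     key = key.strip().lower()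
--                     value = value.strip()
--
--                     if key in ['title', 'author', 'status', 'type', 'category', 'created', 'updated']:
--                         metadata[key] = value
--                 except:
--                     continue
--             elif not in_frontmatter:
--                 content_lines.append(line)
--
--         # Get content (first 1000 characters)
--         full_content = '\n'.join(content_lines)
--         metadata['content'] = full_content[:1000].replace('\n', ' ').strip()
--
--         return metadata
--
--     except Exception as e:
--         return {'eip_number': eip_number}
-- ===== SOURCE B (Python) =====
-- def parse_eip_content(content, eip_number):
--     """Parse EIP markdown content: segment by '---' delimiter lines, then two passes."""
--     allowed = {'title', 'author', 'status', 'type', 'category', 'created', 'updated'}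
--
--     # Pass 1: partition lines into segments separated by '---' delimiter lines.
--     done = []
--     cur = []
--     for line in content.split('\n'):
--         if line.strip() == '---':
--             done.append(cur)
--             cur = []
--         else:
--             cur.append(line)
--     segments = done + [cur]
--
--     # Pass 2: odd-indexed segments are frontmatter; parse key: value lines.
--     metadata = {'eip_number': eip_number}
--     for i, seg in enumerate(segments):
--         if i % 2 == 1:
--             for line in seg:
--                 if ':' in line:
--                     key, value = line.split(':', 1)
--                     key = key.strip().lower()
--                     if key in allowed:
--                         metadata[key] = value.strip()
--
--     # Pass 3: even-indexed segments are body content.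
--     content_lines = [line for i, seg in enumerate(segments) if i % 2 == 0 for line in seg]
--     metadata['content'] = '\n'.join(content_lines)[:1000].replace('\n', ' ').strip()
--     return metadata
-- ===== Notes on version B (the rewrite author's own statement) =====
-- stated objective: alternative
-- what changed: Replaces A's single stateful loop with a toggled in_frontmatter flag by a partition-then-two-passes decomposition: the lines are first split into segments at '---' delimiter lines, then odd-indexed segments are parsed as frontmatter key:value pairs and even-indexed segments are flattened into the body content.
import Mathlib
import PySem

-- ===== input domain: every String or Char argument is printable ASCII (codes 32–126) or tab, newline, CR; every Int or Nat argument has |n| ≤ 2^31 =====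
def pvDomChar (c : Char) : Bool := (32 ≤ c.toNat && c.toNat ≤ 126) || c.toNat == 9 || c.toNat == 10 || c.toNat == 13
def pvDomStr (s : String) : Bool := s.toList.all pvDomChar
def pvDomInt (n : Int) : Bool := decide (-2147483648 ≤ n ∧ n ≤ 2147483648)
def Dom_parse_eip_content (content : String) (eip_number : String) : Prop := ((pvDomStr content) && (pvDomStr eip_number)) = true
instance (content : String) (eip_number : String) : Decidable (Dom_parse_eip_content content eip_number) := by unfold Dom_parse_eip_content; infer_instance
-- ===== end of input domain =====

-- B replaces A's single stateful loop (an in_frontmatter toggle) by a partition of the lines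
-- into '---'-delimited segments followed by two separate index-parity passes (alternative
-- decomposition, same asymptotic cost; return value only — no side effects in either version).

-- ===== PORT A =====
def pvAllowedKeysA : List String :=
  ["title", "author", "status", "type", "category", "created", "updated"]

-- one iteration of A's loop: state = (in_frontmatter, metadata, content_lines)
def pvStepA (st : Bool × PySem.Dict String String × List String) (line : String) :
    Bool × PySem.Dict String String × List String :=
  if PySem.Str.strip line == "---" then (!st.1, st.2.1, st.2.2)
  else if st.1 && PySem.Str.isIn ":" line then
    match PySem.Str.splitMax? line ":" 1 with
    | some [k, v] =>
      let key := PySem.Str.lower (PySem.Str.strip k)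
      let value := PySem.Str.strip v
      if pvAllowedKeysA.contains key then (st.1, st.2.1.insert key value, st.2.2) else st
    | _ => st
  else if st.1 then st
  else (st.1, st.2.1, st.2.2 ++ [line])

def parse_eip_content (content : String) (eip_number : String) : List (String × String) :=
  let lines := (PySem.Str.split? content "\n").getD []
  let st := lines.foldl pvStepA (false, PySem.Dict.ofList [("eip_number", eip_number)], [])
  let full := PySem.Str.join "\n" st.2.2
  (st.2.1.insert "content"
    (PySem.Str.strip (PySem.Str.replace (PySem.Str.slice full none (some 1000)) "\n" " "))).items

-- ===== PORT B =====
def pvAllowedSetB : PySem.Set String :=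
  PySem.Set.ofList ["title", "author", "status", "type", "category", "created", "updated"]

-- pass 1 step: state = (finished segments, current segment)
def pvSegStep (st : List (List String) × List String) (line : String) :
    List (List String) × List String :=
  if PySem.Str.strip line == "---" then (st.1 ++ [st.2], []) else (st.1, st.2 ++ [line])

-- parse one frontmatter line into the dict
def pvFmLine (d : PySem.Dict String String) (line : String) : PySem.Dict String String :=
  if PySem.Str.isIn ":" line then
    match PySem.Str.splitMax? line ":" 1 with
    | some [k, v] =>
      let key := PySem.Str.lower (PySem.Str.strip k)
      if List.contains pvAllowedSetB key then d.insert key (PySem.Str.strip v) else d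
    | _ => d
  else d

-- pass 2 step: odd-indexed segments are frontmatter
def pvDictStep (d : PySem.Dict String String) (p : Int × List String) :
    PySem.Dict String String :=
  if PySem.Int.mod p.1 2 == 1 then p.2.foldl pvFmLine d else d

-- pass 3 step: even-indexed segments are body content
def pvContentStep (acc : List String) (p : Int × List String) : List String :=
  if PySem.Int.mod p.1 2 == 0 then acc ++ p.2 else acc

def parse_eip_content_alt (content : String) (eip_number : String) : List (String × String) :=
  let lines := (PySem.Str.split? content "\n").getD []
  let st := lines.foldl pvSegStep ([], [])
  let segments := st.1 ++ [st.2]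
  let d := (PySem.List.enumerate segments).foldl pvDictStep
    (PySem.Dict.ofList [("eip_number", eip_number)])
  let contentLines := (PySem.List.enumerate segments).foldl pvContentStep []
  (d.insert "content"
    (PySem.Str.strip (PySem.Str.replace
      (PySem.Str.slice (PySem.Str.join "\n" contentLines) none (some 1000)) "\n" " "))).items

-- ===== PRECONDITION & SPEC =====
def Spec_parse_eip_content (content : String) (eip_number : String) (out : List (String × String)) : Prop := out = parse_eip_content_alt content eip_number
instance (content : String) (eip_number : String) (out : List (String × String)) : Decidable (Spec_parse_eip_content content eip_number out) := by unfold Spec_parse_eip_content; infer_instance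

-- ===== CLAIM (what is proved, stated in full; the proofs are below) =====
def Claim_equal_parse_eip_content : Prop := ∀ (content : String) (eip_number : String), Dom_parse_eip_content content eip_number → Spec_parse_eip_content content eip_number (parse_eip_content content eip_number)

-- ===== LEMMAS AND PROOFS =====

-- proof-side recursive segmentation of the line list at '---' delimiter lines
def pvSegs : List String → List (List String)
  | [] => [[]]
  | l :: ls =>
    if PySem.Str.strip l == "---" then [] :: pvSegs ls
    else match pvSegs ls with
      | [] => [[l]]
      | h :: t => (l :: h) :: t

-- frontmatter processing of alternating segments, starting in flag b
def pvProc : Bool → List (List String) → PySem.Dict String String → PySem.Dict String String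
  | _, [], d => d
  | b, s :: t, d => pvProc (!b) t (if b then s.foldl pvFmLine d else d)

-- body lines of alternating segments, starting in flag b
def pvFlat : Bool → List (List String) → List String
  | _, [] => []
  | b, s :: t => (if b then [] else s) ++ pvFlat (!b) t

def pvGlue (cur : List String) : List (List String) → List (List String)
  | [] => [cur]
  | h :: t => (cur ++ h) :: t

lemma pvSegs_ne_nil (ls : List String) : pvSegs ls ≠ [] := by
  cases ls with
  | nil => simp [pvSegs]
  | cons l ls =>
    simp only [pvSegs]
    split
    · simp
    · cases pvSegs ls <;> simp

lemma pvAllowedSetB_eq : pvAllowedSetB = pvAllowedKeysA := by decide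

-- A's processing of one non-delimiter line while in frontmatter is pvFmLine
lemma pvStepA_fm (d : PySem.Dict String String) (cls : List String) (line : String)
    (h : ¬ PySem.Str.strip line == "---") :
    pvStepA (true, d, cls) line = (true, pvFmLine d line, cls) := by
  have h' : (PySem.Str.strip line == "---") = false := by
    simpa using h
  by_cases hin : PySem.Str.isIn ":" line
  · rcases hs : PySem.Str.splitMax? line ":" 1 with _ | l
    · simp [pvStepA, pvFmLine, h', hs]
    · match l with
      | [] => simp [pvStepA, pvFmLine, h', hs]
      | [a] => simp [pvStepA, pvFmLine, h', hs]
      | [a, b] =>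
        simp [pvStepA, pvFmLine, h', hs, pvAllowedSetB_eq]
        split_ifs <;> simp
      | a :: b :: c :: r => simp [pvStepA, pvFmLine, h', hs]
  · have hin' : PySem.Chars.isIn [':'] line.toList = false := by simpa using hin
    simp [pvStepA, pvFmLine, h', hin']

-- the A-loop computes pvProc / pvFlat over the segmentation
lemma pvFoldA (ls : List String) : ∀ (b : Bool) (d : PySem.Dict String String) (cls : List String),
    (ls.foldl pvStepA (b, d, cls)).2.1 = pvProc b (pvSegs ls) d ∧
    (ls.foldl pvStepA (b, d, cls)).2.2 = cls ++ pvFlat b (pvSegs ls) := by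
  induction ls with
  | nil =>
    intro b d cls
    cases b <;> simp [pvSegs, pvProc, pvFlat]
  | cons l ls ih =>
    intro b d cls
    by_cases hl : PySem.Str.strip l == "---"
    · have hstep : pvStepA (b, d, cls) l = (!b, d, cls) := by
        simp [pvStepA, hl]
      have hseg : pvSegs (l :: ls) = [] :: pvSegs ls := by simp [pvSegs, hl]
      rcases ih (!b) d cls with ⟨ih1, ih2⟩
      constructor
      · simp only [List.foldl_cons, hstep, ih1, hseg, pvProc]
        cases b <;> simp
      · simp only [List.foldl_cons, hstep, ih2, hseg, pvFlat]
        cases b <;> simp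
    · obtain ⟨h, t, hht⟩ := List.exists_cons_of_ne_nil (pvSegs_ne_nil ls)
      have hseg : pvSegs (l :: ls) = (l :: h) :: t := by
        simp [pvSegs, hl, hht]
      cases b with
      | true =>
        rcases ih true (pvFmLine d l) cls with ⟨ih1, ih2⟩
        constructor
        · simp only [List.foldl_cons, pvStepA_fm d cls l hl, ih1, hseg, hht, pvProc]
          simp
        · simp only [List.foldl_cons, pvStepA_fm d cls l hl, ih2, hseg, hht, pvFlat]
          simp
      | false =>
        have hstep : pvStepA (false, d, cls) l = (false, d, cls ++ [l]) := by
          simp [pvStepA, hl]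
        rcases ih false d (cls ++ [l]) with ⟨ih1, ih2⟩
        constructor
        · simp only [List.foldl_cons, hstep, ih1, hseg, hht, pvProc]
          simp
        · simp only [List.foldl_cons, hstep, ih2, hseg, hht, pvFlat]
          simp
-- the B segmentation pass computes pvSegs
lemma pvFoldSeg (ls : List String) : ∀ (done : List (List String)) (cur : List String),
    (ls.foldl pvSegStep (done, cur)).1 ++ [(ls.foldl pvSegStep (done, cur)).2]
      = done ++ pvGlue cur (pvSegs ls) := by
  induction ls with
  | nil => intro done cur; simp [pvSegs, pvGlue]
  | cons l ls ih =>
    intro done cur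
    by_cases hl : PySem.Str.strip l == "---"
    · have hstep : pvSegStep (done, cur) l = (done ++ [cur], []) := by simp [pvSegStep, hl]
      obtain ⟨h, t, hht⟩ := List.exists_cons_of_ne_nil (pvSegs_ne_nil ls)
      simp only [List.foldl_cons, hstep, ih, pvSegs, hl, if_true, hht, pvGlue]
      simp
    · have hstep : pvSegStep (done, cur) l = (done, cur ++ [l]) := by simp [pvSegStep, hl]
      obtain ⟨h, t, hht⟩ := List.exists_cons_of_ne_nil (pvSegs_ne_nil ls)
      have hseg : pvSegs (l :: ls) = (l :: h) :: t := by simp [pvSegs, hl, hht]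
      simp only [List.foldl_cons, hstep, ih, hseg, hht, pvGlue]
      simp

lemma pvModTwoOne (i : Nat) : (PySem.Int.mod (i : Int) 2 == 1) = (i % 2 == 1) := by
  rw [PySem.Int.mod_eq_emod_of_pos (by norm_num)]
  rcases Nat.mod_two_eq_zero_or_one i with h | h <;>
    simp [beq_iff_eq, h] <;> omega

lemma pvFlipParity (i : Nat) : (!(i % 2 == 1)) = ((i + 1) % 2 == 1) := by
  rcases Nat.mod_two_eq_zero_or_one i with h | h <;> simp [h, Nat.add_mod]

-- the B dict pass over enumerated segments is pvProc
lemma pvFoldDict (ss : List (List String)) : ∀ (i : Nat) (d : PySem.Dict String String),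
    (PySem.List.enumerate ss (i : Int)).foldl pvDictStep d = pvProc (i % 2 == 1) ss d := by
  induction ss with
  | nil => intro i d; simp [PySem.List.enumerate_nil, pvProc]
  | cons s ss ih =>
    intro i d
    rw [PySem.List.enumerate_cons]
    have : ((i : Int) + 1) = ((i + 1 : Nat) : Int) := by push_cast; ring
    simp only [List.foldl_cons, pvDictStep, pvModTwoOne, this, ih, pvProc, pvFlipParity]

-- the B content pass over enumerated segments is pvFlat
lemma pvFoldContent (ss : List (List String)) : ∀ (i : Nat) (acc : List String),
    (PySem.List.enumerate ss (i : Int)).foldl pvContentStep acc = acc ++ pvFlat (i % 2 == 1) ss := by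
  induction ss with
  | nil => intro i acc; simp [PySem.List.enumerate_nil, pvFlat]
  | cons s ss ih =>
    intro i acc
    rw [PySem.List.enumerate_cons]
    have h1 : ((i : Int) + 1) = ((i + 1 : Nat) : Int) := by push_cast; ring
    rw [List.foldl_cons, h1, ih]
    have hdvd : (2 : Int) ∣ (i : Int) ↔ i % 2 = 0 := by omega
    rcases Nat.mod_two_eq_zero_or_one i with hp | hp <;>
      simp [pvContentStep, pvFlat, hp, hdvd, Nat.add_mod, List.append_assoc]

lemma pvGlue_nil (ss : List (List String)) (h : ss ≠ []) : pvGlue [] ss = ss := by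
  cases ss with
  | nil => exact absurd rfl h
  | cons a t => simp [pvGlue]

-- ===== VERDICT (by name: the statement is the Claim_ definition above) =====
theorem parse_eip_content_spec : Claim_equal_parse_eip_content := by
  intro content eip_number _
  unfold Spec_parse_eip_content parse_eip_content parse_eip_content_alt
  set lines := (PySem.Str.split? content "\n").getD [] with hlines
  have hsegs : (lines.foldl pvSegStep ([], [])).1 ++ [(lines.foldl pvSegStep ([], [])).2]
      = pvSegs lines := by
    rw [pvFoldSeg lines [] []]
    simp [pvGlue_nil _ (pvSegs_ne_nil lines)]
  obtain ⟨hd, hc⟩ := pvFoldA lines false (PySem.Dict.ofList [("eip_number", eip_number)]) []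
  simp only [hd, hc, List.nil_append]
  rw [hsegs]
  have h0 : ((0 : Int)) = ((0 : Nat) : Int) := by norm_num
  rw [show PySem.List.enumerate (pvSegs lines) = PySem.List.enumerate (pvSegs lines) ((0 : Nat) : Int) by norm_num]
  rw [pvFoldDict, pvFoldContent]
  simp
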